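-- pv_equiv track=rewrite | github.com/bean-mhm/bean-mhm.github.io | bond/utils.py | is_valid_function_name
-- ===== SOURCE A (Python) =====
-- digit_chars = '0123456789'
--
-- valid_function_name_chars = 'ABCDEFGHIJKLMNOPQRSTUVWXYZabcdefghijklmnopqrstuvwxyz0123456789_'
--
-- def is_valid_function_name(s: str) -> bool:
--     # can't be empty
--     if s == '':
--         return False
--
--     # can't start with a digit
--     if s[0] in digit_chars:
--         return False
--
--     # check if all else is valid
--     for char in s:
--         if char not in valid_function_name_chars:
--             return False
--
--     return True
-- ===== SOURCE B (Python) =====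
-- START, ACCEPT, REJECT = 0, 1, 2
--
-- def _step(state: int, c: str) -> int:
--     # transition function of a 3-state DFA for [A-Za-z_][A-Za-z0-9_]*
--     if state == REJECT:
--         return REJECT
--     is_alpha = ('A' <= c <= 'Z') or ('a' <= c <= 'z') or c == '_'
--     if state == START:
--         return ACCEPT if is_alpha else REJECT
--     return ACCEPT if (is_alpha or '0' <= c <= '9') else REJECT
--
-- def is_valid_function_name(s: str) -> bool:
--     # run the DFA over the string; accept iff we end in ACCEPT
--     state = START
--     for c in s:
--         state = _step(state, c)
--     return state == ACCEPT
-- ===== Notes on version B (the rewrite author's own statement) =====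
-- stated objective: alternative
-- what changed: Replaced A's staged guards (empty check, first-char digit check, then a membership scan over a 63-character alphabet string) by a single fold running an explicit 3-state deterministic finite automaton for [A-Za-z_][A-Za-z0-9_]* whose transition function uses range comparisons, with no membership scans and no special-casing of the first character outside the automaton state.
import Mathlib
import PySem

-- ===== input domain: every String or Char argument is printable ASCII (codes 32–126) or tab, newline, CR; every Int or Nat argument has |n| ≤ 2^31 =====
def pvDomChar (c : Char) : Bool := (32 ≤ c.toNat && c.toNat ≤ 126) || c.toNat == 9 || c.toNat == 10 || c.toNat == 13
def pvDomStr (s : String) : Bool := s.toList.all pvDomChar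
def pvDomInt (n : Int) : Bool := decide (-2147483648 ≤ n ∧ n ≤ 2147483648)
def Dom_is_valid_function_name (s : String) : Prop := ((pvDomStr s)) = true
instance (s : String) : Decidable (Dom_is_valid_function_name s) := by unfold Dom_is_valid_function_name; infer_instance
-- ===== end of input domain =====

-- B replaces A's staged guards plus 63-char alphabet membership scan by a single fold
-- running an explicit 3-state DFA for [A-Za-z_][A-Za-z0-9_]* (alternative decomposition).

-- ===== PORT A =====
def digit_chars : List Char := "0123456789".toList

def valid_function_name_chars : List Char :=
  "ABCDEFGHIJKLMNOPQRSTUVWXYZabcdefghijklmnopqrstuvwxyz0123456789_".toList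

def is_valid_function_name (s : String) : Bool :=
  -- if s == '': return False
  if s.toList = [] then false
  else
    -- if s[0] in digit_chars: return False
    match PySem.List.pyGet? s.toList 0 with
    | none => false
    | some c0 =>
      if digit_chars.contains c0 then false
      else
        -- for char in s: if char not in valid_function_name_chars: return False
        -- return True
        s.toList.all (fun c => valid_function_name_chars.contains c)

-- ===== PORT B =====
-- _step: transition function of the 3-state DFA (0 = START, 1 = ACCEPT, 2 = REJECT)
def dfaStep (state : Int) (c : Char) : Int :=
  if state == 2 then 2
  else
    let is_alpha := ('A' ≤ c && c ≤ 'Z') || ('a' ≤ c && c ≤ 'z') || c == '_'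
    if state == 0 then (if is_alpha then 1 else 2)
    else (if is_alpha || ('0' ≤ c && c ≤ '9') then 1 else 2)

def is_valid_function_name_alt (s : String) : Bool :=
  -- run the DFA over the string; accept iff we end in ACCEPT
  (s.toList.foldl dfaStep 0) == 1

-- ===== PRECONDITION & SPEC =====
def Spec_is_valid_function_name (s : String) (out : Bool) : Prop := out = is_valid_function_name_alt s
instance (s : String) (out : Bool) : Decidable (Spec_is_valid_function_name s out) := by unfold Spec_is_valid_function_name; infer_instance

-- ===== CLAIM =====
def Claim_equal_is_valid_function_name : Prop := ∀ (s : String), Dom_is_valid_function_name s → Spec_is_valid_function_name s (is_valid_function_name s)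

-- ===== LEMMAS AND PROOFS =====

def contChar (c : Char) : Bool :=
  ('A' ≤ c && c ≤ 'Z') || ('a' ≤ c && c ≤ 'z') || c == '_' || ('0' ≤ c && c ≤ '9')

-- a pointwise Bool fact checked on all 127 chars of the domain transfers to any domain char
theorem char_bounded (P : Char → Bool)
    (hall : (List.range 127).all (fun n => P (Char.ofNat n)) = true)
    (c : Char) (h : c.toNat < 127) : P c = true := by
  have := List.all_eq_true.mp hall c.toNat (List.mem_range.mpr h)
  rwa [Char.ofNat_toNat] at this

theorem dom_char_lt (c : Char) (h : pvDomChar c = true) : c.toNat < 127 := by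
  simp [pvDomChar] at h
  omega

theorem cont_eq_valid (c : Char) (h : pvDomChar c = true) :
    valid_function_name_chars.contains c = contChar c := by
  have := char_bounded
    (fun c => valid_function_name_chars.contains c == contChar c)
    (by decide) c (dom_char_lt c h)
  simpa using this

theorem start_eq (c : Char) (h : pvDomChar c = true) :
    (!digit_chars.contains c && valid_function_name_chars.contains c)
      = (('A' ≤ c && c ≤ 'Z') || ('a' ≤ c && c ≤ 'z') || c == '_') := by
  have := char_bounded
    (fun c => (!digit_chars.contains c && valid_function_name_chars.contains c)
      == (('A' ≤ c && c ≤ 'Z') || ('a' ≤ c && c ≤ 'z') || c == '_'))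
    (by decide) c (dom_char_lt c h)
  simpa using this

theorem foldl_from_two (l : List Char) : l.foldl dfaStep 2 = 2 := by
  induction l with
  | nil => rfl
  | cons c rest ih => simpa [dfaStep] using ih

theorem foldl_from_one (l : List Char) :
    l.foldl dfaStep 1 = (if l.all contChar then 1 else 2) := by
  induction l with
  | nil => rfl
  | cons c rest ih =>
    have hstep : dfaStep 1 c = if contChar c = true then (1 : Int) else 2 := rfl
    cases h : contChar c
    · simp [List.foldl_cons, hstep, h, foldl_from_two]
    · simp [List.foldl_cons, hstep, h, ih]

theorem ite_accept (b : Bool) : ((if b = true then (1 : Int) else 2) == 1) = b := by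
  cases b <;> simp

theorem all_valid_eq_all_cont (l : List Char) (h : l.all pvDomChar = true) :
    l.all (fun c => valid_function_name_chars.contains c) = l.all contChar := by
  induction l with
  | nil => rfl
  | cons c rest ih =>
    simp only [List.all_cons, Bool.and_eq_true] at h
    simp only [List.all_cons]
    rw [cont_eq_valid c h.1, ih h.2]

-- ===== VERDICT =====
theorem is_valid_function_name_spec : Claim_equal_is_valid_function_name := by
  intro s hdom
  unfold Spec_is_valid_function_name is_valid_function_name is_valid_function_name_alt
  have hdom' : s.toList.all pvDomChar = true := hdom
  cases h : s.toList with
  | nil => simp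
  | cons c rest =>
    rw [h] at hdom'
    simp only [List.all_cons, Bool.and_eq_true] at hdom'
    obtain ⟨hc, hrest⟩ := hdom'
    simp only [reduceCtorEq, if_false, PySem.List.pyGet?_zero_cons, List.foldl_cons]
    have hstart := start_eq c hc
    by_cases ha : (('A' ≤ c && c ≤ 'Z') || ('a' ≤ c && c ≤ 'z') || c == '_') = true
    · have hs1 : dfaStep 0 c = 1 := by simp [dfaStep, ha]
      rw [hs1, foldl_from_one, ite_accept]
      rw [ha] at hstart
      have hnd : digit_chars.contains c = false := by
        cases hd : digit_chars.contains c <;> simp_all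
      have hv : valid_function_name_chars.contains c = true := by
        cases hv2 : valid_function_name_chars.contains c <;> simp_all
      rw [hnd, List.all_cons, hv]
      simpa using all_valid_eq_all_cont rest hrest
    · have haf : (('A' ≤ c && c ≤ 'Z') || ('a' ≤ c && c ≤ 'z') || c == '_') = false := by
        simpa using ha
      have hs2 : dfaStep 0 c = 2 := by
        simp only [dfaStep]
        simp [Bool.or_eq_false_iff.mp haf]
      rw [hs2, foldl_from_two]
      rw [haf] at hstart
      cases hd : digit_chars.contains c
      · have hv : valid_function_name_chars.contains c = false := by simp_all
        simp only [Bool.false_eq_true, if_false, List.all_cons, hv, Bool.false_and]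
        decide
      · simp only [if_true]
        decide
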